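-- pv_equiv track=rewrite | github.com/C4commander/MPSDroid | MPSDroid/test-train/sequences_merge.py | _infer_label_from_parts
-- ===== SOURCE A (Python) =====
-- from typing import Dict, List, Tuple
--
-- def _infer_label_from_parts(parts: List[str]) -> int:
--     """
--     根据路径分段推断标签：
--     - 若分段中出现 'malware' 则 1
--     - 若分段中出现 'benign'  则 0
--     若两者都出现，按更靠近文件的分段优先（即从末尾向前找第一个匹配）。
--     若都无，返回 -1。
--     """
--     for seg in reversed(parts):
--         s = seg.lower()
--         if s == 'malware':
--             return 1
--         if s == 'benign':
--             return 0
--     return -1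
-- ===== SOURCE B (Python) =====
-- def _infer_label_from_parts(parts):
--     lows = [seg.lower() for seg in parts]
--     im = max((i for i, s in enumerate(lows) if s == 'malware'), default=-1)
--     ib = max((i for i, s in enumerate(lows) if s == 'benign'), default=-1)
--     if im == ib:
--         return -1
--     return 1 if im > ib else 0
-- ===== Notes on version B (the rewrite author's own statement) =====
-- stated objective: alternative
-- what changed: Instead of reverse-scanning with early exit, B computes the last occurrence index of each of the two keywords in staged passes and decides the label by comparing the two indices arithmetically.
import Mathlib
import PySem

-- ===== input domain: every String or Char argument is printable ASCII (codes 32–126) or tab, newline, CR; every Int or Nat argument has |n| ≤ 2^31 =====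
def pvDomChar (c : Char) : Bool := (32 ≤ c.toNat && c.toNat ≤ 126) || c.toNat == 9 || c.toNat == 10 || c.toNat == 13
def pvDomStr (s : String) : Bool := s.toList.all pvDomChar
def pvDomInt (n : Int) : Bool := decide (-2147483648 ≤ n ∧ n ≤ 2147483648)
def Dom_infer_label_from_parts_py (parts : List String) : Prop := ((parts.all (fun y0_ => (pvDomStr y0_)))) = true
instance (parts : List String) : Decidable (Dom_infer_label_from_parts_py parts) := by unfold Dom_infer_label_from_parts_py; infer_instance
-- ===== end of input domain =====

-- B computes the last index of each keyword in staged passes and compares them, instead of A's reverse scan with early exit (alternative decomposition, same cost).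
-- ===== PORT A =====
-- 'for seg in reversed(parts): …' with early return: structural recursion over parts.reverse
def pvA_loop (l : List String) : Int :=
  match l with
  | [] => -1
  | seg :: rest =>
    let s := PySem.Str.lower seg
    if s = "malware" then 1
    else if s = "benign" then 0
    else pvA_loop rest

def infer_label_from_parts_py (parts : List String) : Int :=
  pvA_loop parts.reverse

-- ===== PORT B =====
-- max((i for i, s in enumerate(lows) if s == t), default=-1): a max-fold over the enumerated list
def pvLastIdx (t : String) (lows : List String) : Int :=
  (PySem.List.enumerate lows).foldl (fun acc p => if p.2 = t then max acc p.1 else acc) (-1)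

def infer_label_from_parts_py_alt (parts : List String) : Int :=
  let lows := parts.map PySem.Str.lower
  let im := pvLastIdx "malware" lows
  let ib := pvLastIdx "benign" lows
  if im = ib then -1
  else if im > ib then 1 else 0

-- ===== PRECONDITION & SPEC =====
def Spec_infer_label_from_parts_py (parts : List String) (out : Int) : Prop := out = infer_label_from_parts_py_alt parts
instance (parts : List String) (out : Int) : Decidable (Spec_infer_label_from_parts_py parts out) := by unfold Spec_infer_label_from_parts_py; infer_instance

-- ===== CLAIM (what is proved, stated in full; the proofs are below) =====
def Claim_equal_infer_label_from_parts_py : Prop := ∀ (parts : List String), Dom_infer_label_from_parts_py parts → Spec_infer_label_from_parts_py parts (infer_label_from_parts_py parts)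

-- ===== LEMMAS AND PROOFS =====

-- ===== VERDICT (by name: the statement is the Claim_ definition above) =====
-- the fold underlying pvLastIdx
theorem pvFold_lb (t : String) (l : List (Int × String)) (a : Int) :
    a ≤ l.foldl (fun acc p => if p.2 = t then max acc p.1 else acc) a := by
  induction l generalizing a with
  | nil => simp
  | cons x xs ih =>
    simp only [List.foldl_cons]
    refine le_trans ?_ (ih _)
    split <;> omega

theorem pvFold_ub (t : String) (l : List (Int × String)) (a N : Int)
    (hl : ∀ p ∈ l, p.1 < N) (ha : a < N) :
    l.foldl (fun acc p => if p.2 = t then max acc p.1 else acc) a < N := by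
  induction l generalizing a with
  | nil => simpa using ha
  | cons x xs ih =>
    simp only [List.foldl_cons]
    refine ih _ (fun p hp => hl p (List.mem_cons_of_mem _ hp)) ?_
    have := hl x (List.mem_cons_self)
    split <;> omega

theorem pvLastIdx_bounds (t : String) (lows : List String) :
    -1 ≤ pvLastIdx t lows ∧ pvLastIdx t lows < (lows.length : Int) := by
  constructor
  · exact pvFold_lb t _ (-1)
  · refine pvFold_ub t _ (-1) _ ?_ (by omega)
    intro p hp
    rcases (PySem.List.mem_enumerate_iff _ _ _).1 hp with ⟨k, hk, rfl⟩
    simp; omega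

theorem pvLastIdx_snoc (t : String) (lows : List String) (x : String) :
    pvLastIdx t (lows ++ [x]) =
      if x = t then (lows.length : Int) else pvLastIdx t lows := by
  unfold pvLastIdx
  rw [PySem.List.enumerate_append, List.foldl_append]
  simp only [PySem.List.enumerate, List.foldl_cons, List.foldl_nil]
  have h := pvLastIdx_bounds t lows
  unfold pvLastIdx at h
  split <;> simp <;> omega

theorem main_eq (parts : List String) :
    infer_label_from_parts_py parts = infer_label_from_parts_py_alt parts := by
  induction parts using List.reverseRecOn with
  | nil => decide
  | append_singleton l x ih =>
    have hA : infer_label_from_parts_py (l ++ [x]) =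
        (let s := PySem.Str.lower x
         if s = "malware" then 1 else if s = "benign" then 0
         else infer_label_from_parts_py l) := by
      simp [infer_label_from_parts_py, pvA_loop]
    have hlen : ((l.map PySem.Str.lower).length : Int) = (l.length : Int) := by simp
    have hm := pvLastIdx_bounds "malware" (l.map PySem.Str.lower)
    have hb := pvLastIdx_bounds "benign" (l.map PySem.Str.lower)
    rw [hlen] at hm hb
    simp only [infer_label_from_parts_py_alt, List.map_append, List.map_cons,
      List.map_nil, pvLastIdx_snoc] at *
    by_cases h1 : PySem.Str.lower x = "malware"
    · have hxb : ¬ PySem.Str.lower x = "benign" := by rw [h1]; decide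
      rw [hA]
      simp only [if_pos h1, if_neg hxb]
      rw [if_neg (by omega : ¬ ((l.map PySem.Str.lower).length : Int) =
            pvLastIdx "benign" (l.map PySem.Str.lower)),
          if_pos (by omega)]
    · by_cases h2 : PySem.Str.lower x = "benign"
      · rw [hA]
        simp only [if_neg h1, if_pos h2]
        rw [if_neg (by omega : ¬ (pvLastIdx "malware" (l.map PySem.Str.lower) =
              ((l.map PySem.Str.lower).length : Int))),
            if_neg (by omega)]
      · rw [hA]
        simp only [if_neg h1, if_neg h2]
        exact ih

theorem infer_label_from_parts_py_spec : Claim_equal_infer_label_from_parts_py := by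
  intro parts _
  unfold Spec_infer_label_from_parts_py
  exact main_eq parts
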